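-- pv_equiv track=rewrite | github.com/scattenlaeufer/parteien_beitrags_vergleich | parteien_beitrags_verleich.py | cdu
-- ===== SOURCE A (Python) =====
-- def cdu(einkommen):
--     beitrag = []
--     for e in einkommen:
--         if e < 2500:
--             beitrag.append(6)
--         elif e < 4000:
--             beitrag.append(15)
--         elif e < 6000:
--             beitrag.append(25)
--         else:
--             beitrag.append(50)
--     return beitrag
-- ===== SOURCE B (Python) =====
-- # Fee as a base amount plus an additive increment for every threshold crossed
-- # (6 -> +9 -> +10 -> +25 gives 6/15/25/50), instead of selecting a branch.
-- STUFEN = [(2500, 9), (4000, 10), (6000, 25)]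
--
-- def cdu(einkommen):
--     return [6 + sum(z for g, z in STUFEN if g <= e) for e in einkommen]
-- ===== Notes on version B (the rewrite author's own statement) =====
-- stated objective: alternative
-- what changed: Instead of selecting one tier by an if/elif cascade, B computes each fee arithmetically as the base fee plus the sum of per-threshold additive increments for every threshold the income has crossed.
import Mathlib
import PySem

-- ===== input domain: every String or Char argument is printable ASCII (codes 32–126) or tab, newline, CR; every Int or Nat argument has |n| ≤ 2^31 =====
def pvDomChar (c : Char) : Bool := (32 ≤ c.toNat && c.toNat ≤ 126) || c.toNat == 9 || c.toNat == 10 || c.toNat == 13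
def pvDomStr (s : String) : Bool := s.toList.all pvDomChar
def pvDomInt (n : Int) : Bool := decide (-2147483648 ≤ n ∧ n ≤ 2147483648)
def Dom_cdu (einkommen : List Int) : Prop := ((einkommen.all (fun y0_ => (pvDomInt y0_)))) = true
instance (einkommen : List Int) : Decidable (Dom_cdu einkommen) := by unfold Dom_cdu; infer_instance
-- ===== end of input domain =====

-- B replaces A's if/elif tier cascade by an arithmetic formula: base fee 6 plus additive increments summed over crossed thresholds (alternative; same cost).


-- ===== PORT A =====
def cdu (einkommen : List Int) : List Int :=
  einkommen.foldl
    (fun beitrag e =>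
      if e < 2500 then beitrag ++ [6]
      else if e < 4000 then beitrag ++ [15]
      else if e < 6000 then beitrag ++ [25]
      else beitrag ++ [50])
    []

-- ===== PORT B =====
def pvStufen : List (Int × Int) := [(2500, 9), (4000, 10), (6000, 25)]
-- sum(z for g, z in STUFEN if g <= e)
def pvZuschlag (e : Int) : Int :=
  pvStufen.foldl (fun s p => if p.1 ≤ e then s + p.2 else s) 0
def cdu_alt (einkommen : List Int) : List Int :=
  einkommen.map (fun e => 6 + pvZuschlag e)

-- ===== PRECONDITION & SPEC =====
def Spec_cdu (einkommen : List Int) (out : List Int) : Prop := out = cdu_alt einkommen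
instance (einkommen : List Int) (out : List Int) : Decidable (Spec_cdu einkommen out) := by unfold Spec_cdu; infer_instance

-- ===== CLAIM (what is proved, stated in full; the proofs are below) =====
def Claim_equal_cdu : Prop := ∀ (einkommen : List Int), Dom_cdu einkommen → Spec_cdu einkommen (cdu einkommen)

-- ===== LEMMAS AND PROOFS =====
-- per-element agreement: the selected tier equals base 6 plus summed increments
theorem pv_elem_eq (e : Int) :
    (if e < 2500 then (6 : Int) else if e < 4000 then 15 else if e < 6000 then 25 else 50)
    = 6 + pvZuschlag e := by
  simp only [pvZuschlag, pvStufen, List.foldl_cons, List.foldl_nil]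
  split_ifs <;> omega

theorem pv_cdu_acc (einkommen : List Int) (acc : List Int) :
    einkommen.foldl
      (fun beitrag e =>
        if e < 2500 then beitrag ++ [6]
        else if e < 4000 then beitrag ++ [15]
        else if e < 6000 then beitrag ++ [25]
        else beitrag ++ [50])
      acc = acc ++ cdu_alt einkommen := by
  induction einkommen generalizing acc with
  | nil => simp [cdu_alt]
  | cons e rest ih =>
      simp only [List.foldl_cons, cdu_alt, List.map_cons]
      have h := pv_elem_eq e
      split_ifs at h ⊢ <;> rw [ih] <;> simp [cdu_alt, ← h]

-- ===== VERDICT (by name: the statement is the Claim_ definition above) =====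
theorem cdu_spec : Claim_equal_cdu := by
  intro einkommen _
  unfold Spec_cdu cdu
  simpa using pv_cdu_acc einkommen []
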